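-- pv_equiv track=rewrite | github.com/cafrii/omega2 | 백준/Silver/15993. 1， 2， 3 더하기 8/1， 2， 3 더하기 8.py | solve
-- ===== SOURCE A (Python) =====
-- MOD = 1_000_000_009
--
-- def solve(A:list[int])->list[str]:
--     '''
--     Args:
--         list of test case. [ n1, n2, .. ]
--     Returns:
--         answer string list. [ "<cases_odd> <cases_even>", ... ]
--     '''
--     max_n = max(A)
--     alloc_n = max(4, max_n)
--
--     dp = [ [0,0] for k in range(alloc_n+1) ]
--     # dp[k][0]: 1,2,3 을 짝수개 사용하여 n을 만든 경우의 수
--     # dp[k][1]: 홀수개 사용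
--
--     # dp[0][*] = 0
--     dp[1][0] = 0
--     dp[1][1] = 1 # 1
--
--     dp[2][0] = 1 # 1+1
--     dp[2][1] = 1 # 2
--
--     dp[3][0] = 2 # 2+1 1+2
--     dp[3][1] = 2 # 1+1+1 3
--
--     # dp[4][0] = 4 # 1+1+1+1 3+1 2+2 1+3
--     # dp[4][1] = 3 # 2+1+1 1+2+1 1+1+2
--
--     # dp[k] 는 dp[k-1]에 +1, dp[k-2]에 +2, dp[k-3]에 +3 하는 경우가 존재함.
--     # 각 경우마다 숫자 하나만을 추가하는 것이므로 홀/짝이 바뀐다는 점에 유의.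
--
--     for k in range(4, max_n+1): # k: 4 ~ max_n
--         dp[k][0] = (dp[k-1][1] + dp[k-2][1] + dp[k-3][1]) % MOD
--         dp[k][1] = (dp[k-1][0] + dp[k-2][0] + dp[k-3][0]) % MOD
--
--     return [ f'{dp[n][1]} {dp[n][0]}' for n in A ]
-- ===== SOURCE B (Python) =====
-- MOD = 1_000_000_009
--
-- def solve(A: list[int]) -> list[str]:
--     '''
--     Args:
--         list of test case. [ n1, n2, .. ]
--     Returns:
--         answer string list. [ "<cases_odd> <cases_even>", ... ]
--     '''
--     max_n = max(A)
--     inv2 = (MOD + 1) // 2  # modular inverse of 2 (MOD is odd)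
--     # T[k]: total number of 1,2,3-compositions of k (mod MOD)
--     # D[k]: signed difference (#odd-length - #even-length compositions of k), mod MOD
--     T = [0, 1, 2, 4]
--     D = [0, 1, 0, 0]
--     for k in range(4, max_n + 1):
--         T.append((T[k - 1] + T[k - 2] + T[k - 3]) % MOD)
--         D.append((-(D[k - 1] + D[k - 2] + D[k - 3])) % MOD)
--     return [f'{(T[n] + D[n]) * inv2 % MOD} {(T[n] - D[n]) * inv2 % MOD}' for n in A]
-- ===== Notes on version B (the rewrite author's own statement) =====
-- stated objective: alternative
-- what changed: Instead of A's coupled (even,odd) pair table, B builds two decoupled linear recurrences - T(k)=T(k-1)+T(k-2)+T(k-3) (total compositions) and signed D(k)=-(D(k-1)+D(k-2)+D(k-3)) (odd minus even) - and reconstructs each answer as odd=(T+D)/2, even=(T-D)/2 via the modular inverse of 2.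
-- outside the precondition, e.g. on solve([-1]): A returns ['0 0'], B returns ['2 2']; on solve([-5]): A returns ['0 0'], B raises IndexError
import Mathlib
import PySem

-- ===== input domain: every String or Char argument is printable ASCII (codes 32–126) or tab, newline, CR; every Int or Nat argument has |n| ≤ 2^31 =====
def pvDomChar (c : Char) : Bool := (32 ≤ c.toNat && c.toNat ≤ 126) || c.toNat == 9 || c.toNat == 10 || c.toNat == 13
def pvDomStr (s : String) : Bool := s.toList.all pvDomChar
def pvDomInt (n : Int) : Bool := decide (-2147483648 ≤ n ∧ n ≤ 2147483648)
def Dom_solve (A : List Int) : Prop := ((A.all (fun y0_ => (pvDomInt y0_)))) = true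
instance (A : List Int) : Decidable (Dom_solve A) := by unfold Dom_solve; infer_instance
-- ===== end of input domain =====

-- B replaces A's coupled (even,odd) DP table by two decoupled recurrences — total T and signed
-- difference D — reconstructing each answer with the modular inverse of 2 (objective: alternative).

def pvMOD : Int := 1000000009

-- exact Python list indexing (negative index from the end, none = IndexError) on an Array
def pvAGet? {α : Type} (a : Array α) (i : Int) : Option α := PySem.List.pyGet? a.toList i

-- ===== PORT A =====
-- the loop body: dp[k][0] and dp[k][1] read only entries k-1,k-2,k-3, which are in [1,k) and hence
-- structurally in range (so the total '.getD (…).toNat' form with 4 ≤ k is exact), and which the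
-- first write does not touch, so writing the pair at index k (k ≤ max_n < size, in range) at once is exact
def pvStepA (dp : Array (Int × Int)) (k : Int) : Array (Int × Int) :=
  let e := PySem.Int.mod ((dp.getD (k - 1).toNat (0, 0)).2 + (dp.getD (k - 2).toNat (0, 0)).2 +
           (dp.getD (k - 3).toNat (0, 0)).2) pvMOD
  let o := PySem.Int.mod ((dp.getD (k - 1).toNat (0, 0)).1 + (dp.getD (k - 2).toNat (0, 0)).1 +
           (dp.getD (k - 3).toNat (0, 0)).1) pvMOD
  dp.setIfInBounds k.toNat (e, o)

-- dp = [[0,0] for _ in range(alloc_n+1)] with dp[1],dp[2],dp[3] assigned (indices 1..3 < size)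
def pvInitA (mx : Int) : Array (Int × Int) :=
  (((Array.replicate ((max 4 mx).toNat + 1) ((0 : Int), (0 : Int))).setIfInBounds 1
      (0, 1)).setIfInBounds 2 (1, 1)).setIfInBounds 3 (2, 2)

-- f'{dp[n][1]} {dp[n][0]}'
def pvFmtA (o : Option (Int × Int)) : String :=
  match o with
  | some p => PySem.Int.toStr p.2 ++ " " ++ PySem.Int.toStr p.1
  | none => ""  -- IndexError (n below -len(dp)): outside Pre_solve

def solve (A : List Int) : List String :=
  match PySem.List.max? A (fun x => x) with
  | none => []  -- max([]) raises ValueError: outside Pre_solve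
  | some max_n =>
    let dp := (PySem.List.pyRange 4 (max_n + 1) 1).foldl pvStepA (pvInitA max_n)
    A.map (fun n => pvFmtA (pvAGet? dp n))

-- ===== PORT B =====
def pvInv2 : Int := PySem.Int.floordiv (pvMOD + 1) 2

-- T.append((T[k-1]+T[k-2]+T[k-3]) % MOD); D.append((-(D[k-1]+D[k-2]+D[k-3])) % MOD);
-- the read indices are in [1,k) and hence structurally in range, so '.getD (…).toNat' is exact
def pvStepB (TD : Array Int × Array Int) (k : Int) : Array Int × Array Int :=
  (TD.1.push (PySem.Int.mod
      (TD.1.getD (k - 1).toNat 0 + TD.1.getD (k - 2).toNat 0 + TD.1.getD (k - 3).toNat 0) pvMOD),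
   TD.2.push (PySem.Int.mod
      (-(TD.2.getD (k - 1).toNat 0 + TD.2.getD (k - 2).toNat 0 + TD.2.getD (k - 3).toNat 0)) pvMOD))

-- f'{(T[n]+D[n])*inv2 % MOD} {(T[n]-D[n])*inv2 % MOD}'
def pvFmtB (t? d? : Option Int) : String :=
  match t?, d? with
  | some t, some d =>
    PySem.Int.toStr (PySem.Int.mod ((t + d) * pvInv2) pvMOD) ++ " " ++
    PySem.Int.toStr (PySem.Int.mod ((t - d) * pvInv2) pvMOD)
  | _, _ => ""  -- IndexError (n below -len(T)): outside Pre_solve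

def solve_alt (A : List Int) : List String :=
  match PySem.List.max? A (fun x => x) with
  | none => []  -- max([]) raises ValueError: outside Pre_solve
  | some max_n =>
    let TD := (PySem.List.pyRange 4 (max_n + 1) 1).foldl pvStepB
      (#[0, 1, 2, 4], #[0, 1, 0, 0])
    A.map (fun n => pvFmtB (pvAGet? TD.1 n) (pvAGet? TD.2 n))

-- ===== PRECONDITION & SPEC =====
-- max(A) (only used by Pre_; 0 placeholder on the empty list, which Pre_ excludes anyway)
def pvMaxQ (A : List Int) : Int := (PySem.List.max? A (fun x => x)).getD 0

-- Pre_ excludes: the empty list, where A raises ValueError (max of empty); queries below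
-- -(max(4,max(A))+1), where A raises IndexError; and, when max(A) ≤ 3, negative queries — there
-- A's table is padded to 5 entries but B's only has 4, so Python's negative-index wraparound hits
-- different accidental padding entries in each (and B raises IndexError at -5 where A still returns).
def Pre_solve (A : List Int) : Prop :=
  A ≠ [] ∧ ∀ n ∈ A, 0 ≤ n ∨ (4 ≤ pvMaxQ A ∧ -(pvMaxQ A + 1) ≤ n)
instance (A : List Int) : Decidable (Pre_solve A) := by unfold Pre_solve; infer_instance

def pvWitness_solve : List Int := [4, 1, 7, -2, 0]

def Spec_solve (A : List Int) (out : List String) : Prop := out = solve_alt A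
instance (A : List Int) (out : List String) : Decidable (Spec_solve A out) := by
  unfold Spec_solve; infer_instance

-- ===== CLAIM (what is proved, stated in full; the proofs are below) =====
def Claim_equal_solve : Prop := ∀ (A : List Int), Dom_solve A → Pre_solve A → Spec_solve A (solve A)

-- ===== LEMMAS AND PROOFS =====

-- (e,o) = A's (dp[n][0], dp[n][1]): even-/odd-length composition counts
def pvEO : Nat → Int × Int
  | 0 => (0, 0)
  | 1 => (0, 1)
  | 2 => (1, 1)
  | 3 => (2, 2)
  | n + 4 =>
    (PySem.Int.mod ((pvEO (n + 3)).2 + (pvEO (n + 2)).2 + (pvEO (n + 1)).2) pvMOD,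
     PySem.Int.mod ((pvEO (n + 3)).1 + (pvEO (n + 2)).1 + (pvEO (n + 1)).1) pvMOD)

-- (t,d) = B's (T[n], D[n])
def pvTD : Nat → Int × Int
  | 0 => (0, 0)
  | 1 => (1, 1)
  | 2 => (2, 0)
  | 3 => (4, 0)
  | n + 4 =>
    (PySem.Int.mod ((pvTD (n + 3)).1 + (pvTD (n + 2)).1 + (pvTD (n + 1)).1) pvMOD,
     PySem.Int.mod (-((pvTD (n + 3)).2 + (pvTD (n + 2)).2 + (pvTD (n + 1)).2)) pvMOD)

lemma pvMOD_pos : (0 : Int) < pvMOD := by norm_num [pvMOD]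

lemma pvEO_bounds (n : Nat) :
    0 ≤ (pvEO n).1 ∧ (pvEO n).1 < pvMOD ∧ 0 ≤ (pvEO n).2 ∧ (pvEO n).2 < pvMOD := by
  match n with
  | 0 => norm_num [pvEO, pvMOD]
  | 1 => norm_num [pvEO, pvMOD]
  | 2 => norm_num [pvEO, pvMOD]
  | 3 => norm_num [pvEO, pvMOD]
  | m + 4 =>
    simp only [pvEO, PySem.Int.mod_eq_emod_of_pos pvMOD_pos]
    unfold pvMOD
    omega

lemma pvTD_eq (n : Nat) :
    (pvTD n).1 = ((pvEO n).2 + (pvEO n).1) % pvMOD ∧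
    (pvTD n).2 = ((pvEO n).2 - (pvEO n).1) % pvMOD := by
  induction n using Nat.strong_induction_on with
  | _ n ih =>
    match n with
    | 0 => norm_num [pvTD, pvEO, pvMOD]
    | 1 => norm_num [pvTD, pvEO, pvMOD]
    | 2 => norm_num [pvTD, pvEO, pvMOD]
    | 3 => norm_num [pvTD, pvEO, pvMOD]
    | m + 4 =>
      obtain ⟨h3t, h3d⟩ := ih (m + 3) (by omega)
      obtain ⟨h2t, h2d⟩ := ih (m + 2) (by omega)
      obtain ⟨h1t, h1d⟩ := ih (m + 1) (by omega)
      simp only [pvTD, pvEO, PySem.Int.mod_eq_emod_of_pos pvMOD_pos, h3t, h3d, h2t, h2d, h1t, h1d]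
      unfold pvMOD
      constructor <;> omega

lemma pvInv2_eq : pvInv2 = 500000005 := by decide

-- B's reconstruction (T[n]±D[n])·inv2 mod M gives exactly A's table entries
lemma pv_reconstruct (n : Nat) :
    PySem.Int.mod (((pvTD n).1 + (pvTD n).2) * pvInv2) pvMOD = (pvEO n).2 ∧
    PySem.Int.mod (((pvTD n).1 - (pvTD n).2) * pvInv2) pvMOD = (pvEO n).1 := by
  obtain ⟨ht, hd⟩ := pvTD_eq n
  obtain ⟨he0, he1, ho0, ho1⟩ := pvEO_bounds n
  rw [PySem.Int.mod_eq_emod_of_pos pvMOD_pos, PySem.Int.mod_eq_emod_of_pos pvMOD_pos,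
    ht, hd, pvInv2_eq]
  unfold pvMOD at *
  constructor <;> omega

lemma pvAGetD_toList {α : Type} (a : Array α) (i : Nat) (d : α) :
    a.getD i d = a.toList.getD i d := by
  unfold Array.getD
  split
  · simp [List.getD, *]
  · rw [List.getD_eq_getElem?_getD, List.getElem?_eq_none (by simp; omega)]
    rfl

-- A-side loop invariant: after folding range(4, b), entry j holds pvEO j for all 0 ≤ j < b
lemma pvFoldA (mx b : Int) (hb : 4 ≤ b) (hbM : b ≤ max 4 mx + 1) :
    ((PySem.List.pyRange 4 b 1).foldl pvStepA (pvInitA mx)).toList.length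
        = (max 4 mx).toNat + 1 ∧
    ∀ j : Nat, (j : Int) < b →
      ((PySem.List.pyRange 4 b 1).foldl pvStepA (pvInitA mx)).toList[j]? = some (pvEO j) := by
  have halloc : (4 : Int) ≤ max 4 mx := le_max_left _ _
  induction b, hb using Int.le_induction with
  | base =>
    rw [PySem.List.pyRange_one_eq_nil le_rfl]
    simp only [List.foldl_nil]
    constructor
    · simp [pvInitA]
    · intro j hj2
      have hlen : 4 ≤ (max 4 mx).toNat := by omega
      have hj3 : j ≤ 3 := by omega
      interval_cases j <;> simp [pvInitA, pvEO]
  | succ b hb ih =>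
    obtain ⟨ihl, ihv⟩ := ih (by omega)
    rw [PySem.List.pyRange_one_succ_right (by omega), List.foldl_append, List.foldl_cons,
      List.foldl_nil]
    set F := (PySem.List.pyRange 4 b 1).foldl pvStepA (pvInitA mx) with hF
    have hblen : b.toNat < F.toList.length := by omega
    have hset : (pvStepA F b).toList =
        F.toList.set b.toNat
          (PySem.Int.mod ((pvEO (b.toNat - 1)).2 + (pvEO (b.toNat - 2)).2 +
            (pvEO (b.toNat - 3)).2) pvMOD,
           PySem.Int.mod ((pvEO (b.toNat - 1)).1 + (pvEO (b.toNat - 2)).1 +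
            (pvEO (b.toNat - 3)).1) pvMOD) := by
      have g1 : F.getD (b - 1).toNat (0, 0) = pvEO (b.toNat - 1) := by
        have : (b - 1).toNat = b.toNat - 1 := by omega
        rw [this, pvAGetD_toList, List.getD_eq_getElem?_getD, ihv (b.toNat - 1) (by omega)]
        rfl
      have g2 : F.getD (b - 2).toNat (0, 0) = pvEO (b.toNat - 2) := by
        have : (b - 2).toNat = b.toNat - 2 := by omega
        rw [this, pvAGetD_toList, List.getD_eq_getElem?_getD, ihv (b.toNat - 2) (by omega)]
        rfl
      have g3 : F.getD (b - 3).toNat (0, 0) = pvEO (b.toNat - 3) := by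
        have : (b - 3).toNat = b.toNat - 3 := by omega
        rw [this, pvAGetD_toList, List.getD_eq_getElem?_getD, ihv (b.toNat - 3) (by omega)]
        rfl
      simp only [pvStepA, g1, g2, g3, Array.toList_setIfInBounds]
    rw [hset]
    constructor
    · simp [List.length_set, ihl]
    · intro j hj2
      by_cases hjb : j = b.toNat
      · subst hjb
        rw [List.getElem?_set_self (by omega)]
        obtain ⟨m, hm⟩ : ∃ m, b.toNat = m + 4 := ⟨b.toNat - 4, by omega⟩
        rw [hm]
        have e1 : m + 4 - 1 = m + 3 := by omega
        have e2 : m + 4 - 2 = m + 2 := by omega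
        have e3 : m + 4 - 3 = m + 1 := by omega
        rw [e1, e2, e3]
        rfl
      · rw [List.getElem?_set_ne (by omega)]
        exact ihv j (by omega)

-- B-side loop invariant: after folding range(4, b), T and D are the tables of pvTD values
lemma pvFoldB (b : Int) (hb : 4 ≤ b) :
    ((PySem.List.pyRange 4 b 1).foldl pvStepB (#[0, 1, 2, 4], #[0, 1, 0, 0])).1.toList
        = (List.range b.toNat).map (fun j => (pvTD j).1) ∧
    ((PySem.List.pyRange 4 b 1).foldl pvStepB (#[0, 1, 2, 4], #[0, 1, 0, 0])).2.toList
        = (List.range b.toNat).map (fun j => (pvTD j).2) := by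
  induction b, hb using Int.le_induction with
  | base =>
    rw [PySem.List.pyRange_one_eq_nil le_rfl]
    simp only [List.foldl_nil]
    constructor <;> decide
  | succ b hb ih =>
    obtain ⟨ihT, ihD⟩ := ih
    rw [PySem.List.pyRange_one_succ_right (by omega), List.foldl_append, List.foldl_cons,
      List.foldl_nil]
    set G := (PySem.List.pyRange 4 b 1).foldl pvStepB (#[0, 1, 2, 4], #[0, 1, 0, 0]) with hG
    have hbn : (b + 1).toNat = b.toNat + 1 := by omega
    have hget : ∀ (a : Array Int) (f : Nat → Int) (i : Nat),
        a.toList = (List.range b.toNat).map f → i < b.toNat → a.getD i 0 = f i := by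
      intro a f i ha hi
      rw [pvAGetD_toList, ha, List.getD_eq_getElem?_getD, List.getElem?_map,
        List.getElem?_range hi]
      rfl
    have e1 : (b - 1).toNat = b.toNat - 1 := by omega
    have e2 : (b - 2).toNat = b.toNat - 2 := by omega
    have e3 : (b - 3).toNat = b.toNat - 3 := by omega
    have gT1 := hget G.1 _ (b.toNat - 1) ihT (by omega)
    have gT2 := hget G.1 _ (b.toNat - 2) ihT (by omega)
    have gT3 := hget G.1 _ (b.toNat - 3) ihT (by omega)
    have gD1 := hget G.2 _ (b.toNat - 1) ihD (by omega)
    have gD2 := hget G.2 _ (b.toNat - 2) ihD (by omega)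
    have gD3 := hget G.2 _ (b.toNat - 3) ihD (by omega)
    obtain ⟨m, hm⟩ : ∃ m, b.toNat = m + 4 := ⟨b.toNat - 4, by omega⟩
    have hv : ∀ r : Nat, (pvTD (m + 4)).1 = r → True := fun _ _ => trivial
    constructor
    · simp only [pvStepB, Array.toList_push, ihT, e1, e2, e3, gT1, gT2, gT3, hbn,
        List.range_succ, List.map_append, List.map_cons, List.map_nil]
      congr 1
      rw [hm]
      have f1 : m + 4 - 1 = m + 3 := by omega
      have f2 : m + 4 - 2 = m + 2 := by omega
      have f3 : m + 4 - 3 = m + 1 := by omega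
      rw [f1, f2, f3]
      rfl
    · simp only [pvStepB, Array.toList_push, ihD, e1, e2, e3, gD1, gD2, gD3, hbn,
        List.range_succ, List.map_append, List.map_cons, List.map_nil]
      congr 1
      rw [hm]
      have f1 : m + 4 - 1 = m + 3 := by omega
      have f2 : m + 4 - 2 = m + 2 := by omega
      have f3 : m + 4 - 3 = m + 1 := by omega
      rw [f1, f2, f3]
      rfl

-- the two folds run over the same (possibly empty) range; renaming the bound lets induction start at 4
lemma pvRange_max (mx : Int) :
    PySem.List.pyRange 4 (mx + 1) 1 = PySem.List.pyRange 4 (max 4 (mx + 1)) 1 := by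
  rcases le_total 4 (mx + 1) with h | h
  · rw [max_eq_right h]
  · rw [PySem.List.pyRange_one_eq_nil h, max_eq_left h, PySem.List.pyRange_one_eq_nil le_rfl]

-- ===== VERDICT (by name: the statement is the Claim_ definition above) =====
theorem solve_spec : Claim_equal_solve := by
  intro A _ hpre
  unfold Spec_solve
  cases hmax : PySem.List.max? A (fun x => x) with
  | none => exact absurd ((PySem.List.max?_eq_none_iff A _).mp hmax) hpre.1
  | some mx =>
    have hmaxq : pvMaxQ A = mx := by simp [pvMaxQ, hmax]
    have hmaxall : ∀ y ∈ A, y ≤ mx := PySem.List.max?_isMax hmax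
    have hb4 : (4 : Int) ≤ max 4 (mx + 1) := le_max_left _ _
    have hbM : max 4 (mx + 1) ≤ max 4 mx + 1 := by
      simp only [max_def]
      split_ifs <;> omega
    obtain ⟨hlenA, hvalA⟩ := pvFoldA mx _ hb4 hbM
    obtain ⟨hvalT, hvalD⟩ := pvFoldB _ hb4
    simp only [solve, solve_alt, hmax, pvRange_max mx]
    apply List.map_congr_left
    intro n hn
    have hnmx : n ≤ mx := hmaxall n hn
    -- the index both tables are read at: n itself, or its wraparound n + (mx+1)
    by_cases hn0 : 0 ≤ n
    · -- non-negative query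
      obtain ⟨j, rfl⟩ : ∃ j : Nat, n = (j : Int) := ⟨n.toNat, by omega⟩
      have hjB : (j : Int) < max 4 (mx + 1) := by
        have := le_max_right (4 : Int) (mx + 1)
        omega
      have hA := hvalA j hjB
      simp only [pvAGet?, PySem.List.pyGet?_natCast, hA, hvalT, hvalD, List.getElem?_map,
        List.getElem?_range (by omega : j < (max 4 (mx + 1)).toNat), pvFmtA, pvFmtB,
        Option.map_some]
      obtain ⟨hodd, heven⟩ := pv_reconstruct j
      rw [hodd, heven]
    · -- negative query, admitted only with max(A) ≥ 4: wraps to index len - k in BOTH tables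
      obtain ⟨hmx4, hnlo⟩ : 4 ≤ pvMaxQ A ∧ -(pvMaxQ A + 1) ≤ n := by
        rcases hpre.2 n hn with h | h
        · omega
        · exact h
      rw [hmaxq] at hmx4 hnlo
      have hmm : max 4 mx = mx := max_eq_right hmx4
      have hmm1 : max 4 (mx + 1) = mx + 1 := max_eq_right (by omega)
      obtain ⟨k, hk⟩ : ∃ k : Nat, n = -(k : Int) := ⟨(-n).toNat, by omega⟩
      have hk1 : 0 < k := by omega
      have hklen : k ≤ (max 4 (mx + 1)).toNat := by omega
      have hkA : k ≤ ((PySem.List.pyRange 4 (max 4 (mx + 1)) 1).foldl pvStepA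
          (pvInitA mx)).toList.length := by omega
      have hkT : k ≤ ((PySem.List.pyRange 4 (max 4 (mx + 1)) 1).foldl pvStepB
          (#[0, 1, 2, 4], #[0, 1, 0, 0])).1.toList.length := by
        rw [hvalT]; simpa using hklen
      have hkD : k ≤ ((PySem.List.pyRange 4 (max 4 (mx + 1)) 1).foldl pvStepB
          (#[0, 1, 2, 4], #[0, 1, 0, 0])).2.toList.length := by
        rw [hvalD]; simpa using hklen
      have hlenA' : ((PySem.List.pyRange 4 (max 4 (mx + 1)) 1).foldl pvStepA
          (pvInitA mx)).toList.length = (max 4 (mx + 1)).toNat := by omega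
      have hi : (((max 4 (mx + 1)).toNat - k : Nat) : Int) < max 4 (mx + 1) := by omega
      have hilen : (max 4 (mx + 1)).toNat - k < (max 4 (mx + 1)).toNat := by omega
      have hA := hvalA ((max 4 (mx + 1)).toNat - k) hi
      rw [hk]
      simp only [pvAGet?]
      rw [PySem.List.pyGet?_neg_natCast _ k hk1 hkA, PySem.List.pyGet?_neg_natCast _ k hk1 hkT,
        PySem.List.pyGet?_neg_natCast _ k hk1 hkD, hvalT, hvalD, hlenA']
      simp only [List.length_map, List.length_range, List.getElem?_map,
        List.getElem?_range hilen, Option.map_some, hA, pvFmtA, pvFmtB]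
      obtain ⟨hodd, heven⟩ := pv_reconstruct ((max 4 (mx + 1)).toNat - k)
      rw [hodd, heven]

-- pvWitness_solve satisfies Dom and Pre
theorem pvWitness_ok : Dom_solve pvWitness_solve ∧ Pre_solve pvWitness_solve := by decide
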